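-- pv_equiv track=rewrite | github.com/APOS80/Python3D_test | tdmath.py | translationMatrix
-- ===== SOURCE A (Python) =====
-- def dotProduct(point,mod_matrix): # Dot product/multiplikation
--     dp = []
--     for tupl in mod_matrix:
--         dp.append(tupl[0] * point[0]
--                   + tupl[1] * point[1]
--                   + tupl[2] * point[2]
--                   + tupl[3] * point[3])
--
--     return dp
--
-- def translationMatrix(matrix,dx,dy,dz): # Moves coordinates around, 'd' is delta.
--
--     TM = (
--           (1,0,0,dx),
--           (0,1,0,dy),
--           (0,0,1,dz),
--           (0,0,0,1)
--          )
--
--     mod = [dotProduct(xyz,TM) for xyz in matrix]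
--
--     return mod
-- ===== SOURCE B (Python) =====
-- def translationMatrix(matrix, dx, dy, dz):
--     # Closed-form translation: no 4x4 matrix, no dot product.
--     return [[p[0] + dx * p[3], p[1] + dy * p[3], p[2] + dz * p[3], p[3]]
--             for p in matrix]
-- ===== Notes on version B (the rewrite author's own statement) =====
-- stated objective: simpler
-- what changed: Replaces the 4x4 translation matrix and the general dotProduct helper with a direct closed-form per-point offset [x+dx*w, y+dy*w, z+dz*w, w].
import Mathlib
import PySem

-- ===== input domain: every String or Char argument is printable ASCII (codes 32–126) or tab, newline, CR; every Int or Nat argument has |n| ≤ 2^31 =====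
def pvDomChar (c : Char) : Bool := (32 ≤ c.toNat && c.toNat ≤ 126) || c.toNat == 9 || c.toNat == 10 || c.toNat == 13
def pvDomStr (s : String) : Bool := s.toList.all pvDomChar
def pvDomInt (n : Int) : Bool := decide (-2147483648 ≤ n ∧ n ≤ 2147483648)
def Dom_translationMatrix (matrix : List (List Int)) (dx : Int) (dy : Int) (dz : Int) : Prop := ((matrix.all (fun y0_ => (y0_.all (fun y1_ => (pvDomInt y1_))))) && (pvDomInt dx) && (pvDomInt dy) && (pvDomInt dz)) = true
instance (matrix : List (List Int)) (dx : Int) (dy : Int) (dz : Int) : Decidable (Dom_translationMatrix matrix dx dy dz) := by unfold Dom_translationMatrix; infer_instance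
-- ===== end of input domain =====

-- B replaces the 4x4 matrix multiply with the closed-form per-point offset [x+dx*w, y+dy*w, z+dz*w, w] (simpler).


-- ===== PORT A =====
-- translation of dotProduct: appends one entry per row of the 4x4 matrix
def dotProductPort (point : List Int) (mod_matrix : List (List Int)) : List Int :=
  mod_matrix.foldl (fun dp tupl =>
    dp ++ [(PySem.List.pyGet? tupl 0).getD 0 * (PySem.List.pyGet? point 0).getD 0
         + (PySem.List.pyGet? tupl 1).getD 0 * (PySem.List.pyGet? point 1).getD 0
         + (PySem.List.pyGet? tupl 2).getD 0 * (PySem.List.pyGet? point 2).getD 0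
         + (PySem.List.pyGet? tupl 3).getD 0 * (PySem.List.pyGet? point 3).getD 0]) []

def translationMatrix (matrix : List (List Int)) (dx : Int) (dy : Int) (dz : Int) : List (List Int) :=
  let TM : List (List Int) := [[1,0,0,dx],[0,1,0,dy],[0,0,1,dz],[0,0,0,1]]
  matrix.map (fun xyz => dotProductPort xyz TM)

-- ===== PORT B =====
def translationMatrix_alt (matrix : List (List Int)) (dx : Int) (dy : Int) (dz : Int) : List (List Int) :=
  matrix.map (fun p =>
    [(PySem.List.pyGet? p 0).getD 0 + dx * (PySem.List.pyGet? p 3).getD 0,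
     (PySem.List.pyGet? p 1).getD 0 + dy * (PySem.List.pyGet? p 3).getD 0,
     (PySem.List.pyGet? p 2).getD 0 + dz * (PySem.List.pyGet? p 3).getD 0,
     (PySem.List.pyGet? p 3).getD 0])

-- ===== PRECONDITION & SPEC =====
-- Pre_ excludes exactly the inputs where Python raises IndexError: a point with fewer than 4 components (both A and B index p[3]).
def Pre_translationMatrix (matrix : List (List Int)) (_dx : Int) (_dy : Int) (_dz : Int) : Prop :=
  ∀ p ∈ matrix, 4 ≤ p.length
instance (matrix : List (List Int)) (dx : Int) (dy : Int) (dz : Int) : Decidable (Pre_translationMatrix matrix dx dy dz) := by unfold Pre_translationMatrix; infer_instance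

def pvWitness_translationMatrix : List (List Int) × Int × Int × Int := ([[1,2,3,1],[0,0,0,1]], 5, -4, 7)

def Spec_translationMatrix (matrix : List (List Int)) (dx : Int) (dy : Int) (dz : Int) (out : List (List Int)) : Prop := out = translationMatrix_alt matrix dx dy dz
instance (matrix : List (List Int)) (dx : Int) (dy : Int) (dz : Int) (out : List (List Int)) : Decidable (Spec_translationMatrix matrix dx dy dz out) := by unfold Spec_translationMatrix; infer_instance

-- ===== CLAIM =====
def Claim_equal_translationMatrix : Prop := ∀ (matrix : List (List Int)) (dx : Int) (dy : Int) (dz : Int), Dom_translationMatrix matrix dx dy dz → Pre_translationMatrix matrix dx dy dz → Spec_translationMatrix matrix dx dy dz (translationMatrix matrix dx dy dz)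

-- ===== LEMMAS AND PROOFS =====
lemma dotProductPort_tm (p : List Int) (dx dy dz : Int) (_h : 4 ≤ p.length) :
    dotProductPort p [[1,0,0,dx],[0,1,0,dy],[0,0,1,dz],[0,0,0,1]] =
    [(PySem.List.pyGet? p 0).getD 0 + dx * (PySem.List.pyGet? p 3).getD 0,
     (PySem.List.pyGet? p 1).getD 0 + dy * (PySem.List.pyGet? p 3).getD 0,
     (PySem.List.pyGet? p 2).getD 0 + dz * (PySem.List.pyGet? p 3).getD 0,
     (PySem.List.pyGet? p 3).getD 0] := by
  simp [dotProductPort, PySem.List.pyGet?, PySem.List.pyIdx?]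

-- ===== VERDICT =====
theorem translationMatrix_spec : Claim_equal_translationMatrix := by
  intro matrix dx dy dz _ hpre
  unfold Spec_translationMatrix translationMatrix translationMatrix_alt
  apply List.map_congr_left
  intro p hp
  exact dotProductPort_tm p dx dy dz (hpre p hp)
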